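-- pv_equiv track=rewrite | github.com/Alan4CS/Twitter_Dash | app.py | reemplazar_comas_comentarios
-- ===== SOURCE A (Python) =====
-- def reemplazar_comas_comentarios(comentario):
--     comentario = comentario.strip('[]')
--     dentro_de_comillas = False
--     resultado = []
--
--     for caracter in comentario:
--         if caracter == "'":
--             dentro_de_comillas = not dentro_de_comillas
--         elif caracter == ',' and not dentro_de_comillas:
--             resultado.append(';')
--         else:
--             resultado.append(caracter)
--
--     return ''.join(resultado)
-- ===== SOURCE B (Python) =====
-- def reemplazar_comas_comentarios(comentario):
--     segmentos = comentario.strip('[]').split("'")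
--     # even-indexed segments are outside quotes, odd-indexed ones inside
--     return ''.join(seg.replace(',', ';') if i % 2 == 0 else seg
--                    for i, seg in enumerate(segmentos))
-- ===== Notes on version B (the rewrite author's own statement) =====
-- stated objective: faster
-- what changed: Replaces A's per-character boolean state machine with split-on-quote into segments, replacing commas with semicolons only in even-indexed (outside-quote) segments, then joining; the per-character Python loop is replaced by bulk C-level str.split/str.replace calls.
import Mathlib
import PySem

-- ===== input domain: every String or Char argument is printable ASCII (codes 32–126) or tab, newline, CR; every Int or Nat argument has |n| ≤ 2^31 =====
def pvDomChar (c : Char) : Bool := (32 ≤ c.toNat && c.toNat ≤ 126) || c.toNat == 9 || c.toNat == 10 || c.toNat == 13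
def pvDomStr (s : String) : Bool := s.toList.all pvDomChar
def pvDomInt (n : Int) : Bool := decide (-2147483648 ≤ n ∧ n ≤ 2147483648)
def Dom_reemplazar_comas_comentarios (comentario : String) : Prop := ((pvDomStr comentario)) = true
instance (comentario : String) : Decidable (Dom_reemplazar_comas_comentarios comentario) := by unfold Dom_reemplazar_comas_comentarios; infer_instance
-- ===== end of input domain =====

-- B replaces A's per-character boolean state machine by split-on-quote + per-segment replace in bulk (objective: faster, constant-factor; measured).

-- ===== PORT A =====
-- for-loop with state (dentro_de_comillas, resultado), appending per character
def reemplazar_comas_comentarios (comentario : String) : String :=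
  let comentario' := PySem.Str.stripChars comentario "[]"
  let st := comentario'.toList.foldl
    (fun (st : Bool × List Char) caracter =>
      if caracter = '\'' then (!st.1, st.2)
      else if caracter = ',' ∧ st.1 = false then (st.1, st.2 ++ [';'])
      else (st.1, st.2 ++ [caracter]))
    (false, [])
  String.mk st.2

-- ===== PORT B =====
-- split("'"): Python's single-separator str.split, ported structurally
def pvSplitQuote : List Char → List (List Char)
  | [] => [[]]
  | c :: cs =>
    match pvSplitQuote cs with
    | s :: rest => if c = '\'' then [] :: s :: rest else (c :: s) :: rest
    | [] => [[]]
-- seg.replace(',', ';') on single chars = character map (exact for 1-char old/new)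
def pvReplComma (seg : List Char) : List Char :=
  seg.map (fun c => if c = ',' then ';' else c)

def reemplazar_comas_comentarios_alt (comentario : String) : String :=
  let segmentos := pvSplitQuote (PySem.Str.stripChars comentario "[]").toList
  String.mk ((PySem.List.enumerate segmentos 0).map
    (fun p => if p.1 % 2 == 0 then pvReplComma p.2 else p.2)).flatten

-- ===== PRECONDITION & SPEC =====
def Spec_reemplazar_comas_comentarios (comentario : String) (out : String) : Prop := out = reemplazar_comas_comentarios_alt comentario
instance (comentario : String) (out : String) : Decidable (Spec_reemplazar_comas_comentarios comentario out) := by unfold Spec_reemplazar_comas_comentarios; infer_instance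

-- ===== CLAIM (what is proved, stated in full; the proofs are below) =====
def Claim_equal_reemplazar_comas_comentarios : Prop := ∀ (comentario : String), Dom_reemplazar_comas_comentarios comentario → Spec_reemplazar_comas_comentarios comentario (reemplazar_comas_comentarios comentario)

-- ===== LEMMAS AND PROOFS =====

-- direct-recursion description of A's loop body output
def pvARun (b : Bool) : List Char → List Char
  | [] => []
  | c :: cs =>
    if c = '\'' then pvARun (!b) cs
    else if c = ',' ∧ b = false then ';' :: pvARun b cs
    else c :: pvARun b cs

theorem pvFoldlARun (cs : List Char) : ∀ (b : Bool) (acc : List Char),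
    (cs.foldl (fun (st : Bool × List Char) caracter =>
      if caracter = '\'' then (!st.1, st.2)
      else if caracter = ',' ∧ st.1 = false then (st.1, st.2 ++ [';'])
      else (st.1, st.2 ++ [caracter])) (b, acc)).2 = acc ++ pvARun b cs := by
  induction cs with
  | nil => intro b acc; simp [pvARun]
  | cons c cs ih =>
    intro b acc
    simp only [List.foldl_cons, pvARun]
    by_cases h1 : c = '\''
    · simp [h1, ih]
    · by_cases h2 : c = ',' ∧ b = false
      · simp [h1, h2, ih]
      · simp [h1, h2, ih]

theorem pvSplitQuote_ne_nil (cs : List Char) : pvSplitQuote cs ≠ [] := by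
  cases cs with
  | nil => simp [pvSplitQuote]
  | cons c cs =>
    cases h : pvSplitQuote cs with
    | nil => simp [pvSplitQuote, h]
    | cons s rest => by_cases hc : c = '\'' <;> simp [pvSplitQuote, h, hc]

-- alternating join, starting with an "outside quotes" segment when b = false
def pvAltJoin : Bool → List (List Char) → List Char
  | _, [] => []
  | false, s :: rest => pvReplComma s ++ pvAltJoin true rest
  | true, s :: rest => s ++ pvAltJoin false rest

theorem pvARun_eq_altJoin (cs : List Char) : ∀ b, pvARun b cs = pvAltJoin b (pvSplitQuote cs) := by
  induction cs with
  | nil => intro b; cases b <;> simp [pvARun, pvSplitQuote, pvAltJoin, pvReplComma]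
  | cons c cs ih =>
    intro b
    obtain ⟨s, rest, hs⟩ : ∃ s rest, pvSplitQuote cs = s :: rest := by
      cases h : pvSplitQuote cs with
      | nil => exact absurd h (pvSplitQuote_ne_nil cs)
      | cons s rest => exact ⟨s, rest, rfl⟩
    by_cases h1 : c = '\''
    · cases b <;>
        simp [pvARun, pvSplitQuote, hs, h1, pvAltJoin, ih, pvReplComma]
    · by_cases h2 : c = ','
      · cases b <;>
          simp [pvARun, pvSplitQuote, hs, h2, pvAltJoin, ih, pvReplComma]
      · cases b <;>
          simp [pvARun, pvSplitQuote, hs, h1, h2, pvAltJoin, ih, pvReplComma]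

-- the enumerate/parity formulation equals the alternating recursion
theorem pvEnum_eq_altJoin (segs : List (List Char)) : ∀ (n : Nat),
    ((PySem.List.enumerate segs (n : Int)).map
      (fun p => if p.1 % 2 == 0 then pvReplComma p.2 else p.2)).flatten
    = pvAltJoin (decide (n % 2 = 1)) segs := by
  induction segs with
  | nil => intro n; simp [PySem.List.enumerate_nil, pvAltJoin]
  | cons s rest ih =>
    intro n
    rw [PySem.List.enumerate_cons]
    have hcast : ((n : Int) + 1) = ((n + 1 : Nat) : Int) := by push_cast; ring
    have hI : ((n : Int) % 2) = ((n % 2 : Nat) : Int) := by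
      exact_mod_cast (Int.natCast_mod n 2).symm
    rw [hcast]
    rcases Nat.even_or_odd n with ⟨k, hk⟩ | ⟨k, hk⟩
    · have h0 : n % 2 = 0 := by omega
      have h1 : (n + 1) % 2 = 1 := by omega
      have hc : (((n : Int)) % 2 == 0) = true := by rw [hI, h0]; rfl
      have hih := ih (n + 1)
      rw [h1] at hih
      rw [show decide ((1 : Nat) = 1) = true from rfl] at hih
      rw [h0, show decide ((0 : Nat) % 2 = 1) = false from rfl]
      simp only [List.map_cons, List.flatten_cons, hc, if_true, hih, pvAltJoin]
    · have h0 : n % 2 = 1 := by omega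
      have h1 : (n + 1) % 2 = 0 := by omega
      have hc : (((n : Int)) % 2 == 0) = false := by rw [hI, h0]; rfl
      have hih := ih (n + 1)
      rw [h1] at hih
      rw [show decide ((0 : Nat) % 2 = 1) = false from rfl] at hih
      rw [h0, show decide ((1 : Nat) = 1) = true from rfl]
      simp only [List.map_cons, List.flatten_cons, hc, if_false, Bool.false_eq_true, hih, pvAltJoin]

-- ===== VERDICT (by name: the statement is the Claim_ definition above) =====
theorem reemplazar_comas_comentarios_spec : Claim_equal_reemplazar_comas_comentarios := by
  intro comentario _
  unfold Spec_reemplazar_comas_comentarios reemplazar_comas_comentarios reemplazar_comas_comentarios_alt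
  simp only [pvFoldlARun, List.nil_append]
  rw [pvARun_eq_altJoin]
  have := pvEnum_eq_altJoin (pvSplitQuote (PySem.Str.stripChars comentario "[]").toList) 0
  simp only [Nat.cast_zero] at this
  rw [show decide ((0 : Nat) % 2 = 1) = false from rfl] at this
  rw [this]
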